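-- pv_equiv track=rewrite | github.com/jeniferocha/curso-python-usp | Prova/3999.py | extrair_elementos_centrais
-- ===== SOURCE A (Python) =====
-- def extrair_elementos_centrais(array, indice_central):
--     novo_array = []
--
--     if len(array) % 2 == 0:
--         meio = len(array) // 2
--         novo_array.append(array[meio])
--         for i in range(1, meio + 1):
--             if meio - i >= 0:
--                 novo_array.append(array[meio - i])
--             if meio + i < len(array):
--                 novo_array.append(array[meio + i])
--     else:
--         meio = len(array) // 2
--         novo_array.append(array[meio])
--         for i in range(1, meio + 1):
--             if meio + i < len(array):
--                 novo_array.append(array[meio + i])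
--             if meio - i >= 0:
--                 novo_array.append(array[meio - i])
--
--     return novo_array[:indice_central]
-- ===== SOURCE B (Python) =====
-- def _itl(xs, ys):
--     # interleave, xs first: repeatedly emit the head of the first list and swap roles;
--     # when one side runs out, the rest of the other follows
--     out = []
--     a, b = xs, ys
--     ia, ib = 0, 0
--     while ia < len(a):
--         out.append(a[ia])
--         a, b, ia, ib = b, a, ib, ia + 1
--     out.extend(b[ib:])
--     return out
--
-- def extrair_elementos_centrais(array, indice_central):
--     meio = len(array) // 2
--     centro = array[meio]  # IndexError on empty input, as in the original
--     left = array[:meio][::-1]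
--     right = array[meio + 1:]
--     if len(array) % 2 == 0:
--         pares = _itl(left, right)
--     else:
--         pares = _itl(right, left)
--     return ([centro] + pares)[:indice_central]
-- ===== Notes on version B (the rewrite author's own statement) =====
-- stated objective: alternative
-- what changed: B replaces A's guarded index-walk over range(1, meio+1) by a slice-based decomposition: it takes the reversed left half and the right tail and interleaves them recursively (side order chosen by parity), then slices the prefix.
import Mathlib
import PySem

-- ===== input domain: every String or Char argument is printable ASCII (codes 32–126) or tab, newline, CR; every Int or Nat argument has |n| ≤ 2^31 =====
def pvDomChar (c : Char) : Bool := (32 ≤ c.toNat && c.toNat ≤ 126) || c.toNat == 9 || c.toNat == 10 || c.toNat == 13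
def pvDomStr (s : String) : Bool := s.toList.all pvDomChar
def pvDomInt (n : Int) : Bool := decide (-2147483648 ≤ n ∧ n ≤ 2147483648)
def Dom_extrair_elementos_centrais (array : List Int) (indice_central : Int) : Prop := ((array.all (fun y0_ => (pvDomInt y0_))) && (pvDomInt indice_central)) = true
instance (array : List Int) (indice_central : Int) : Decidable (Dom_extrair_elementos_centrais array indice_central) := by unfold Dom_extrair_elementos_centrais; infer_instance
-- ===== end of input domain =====

-- B interleaves the reversed left half with the right tail instead of A's guarded index walk;
-- the proved equivalence is about the return value (neither program mutates its arguments).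

-- ===== PORT A =====
-- literal transliteration of A: build novo_array with the parity-split guarded loop, slice at the end
def extrair_elementos_centrais (array : List Int) (indice_central : Int) : List Int :=
  let n : Int := array.length
  if PySem.Int.mod n 2 == 0 then
    let meio : Int := PySem.Int.floordiv n 2
    let novo0 : List Int := [(PySem.List.pyGet? array meio).getD 0]
    let novo : List Int := (PySem.List.pyRange 1 (meio + 1) 1).foldl (fun acc i =>
      let acc := if meio - i ≥ 0 then acc ++ [(PySem.List.pyGet? array (meio - i)).getD 0] else acc
      if meio + i < n then acc ++ [(PySem.List.pyGet? array (meio + i)).getD 0] else acc) novo0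
    PySem.List.slice novo none (some indice_central)
  else
    let meio : Int := PySem.Int.floordiv n 2
    let novo0 : List Int := [(PySem.List.pyGet? array meio).getD 0]
    let novo : List Int := (PySem.List.pyRange 1 (meio + 1) 1).foldl (fun acc i =>
      let acc := if meio + i < n then acc ++ [(PySem.List.pyGet? array (meio + i)).getD 0] else acc
      if meio - i ≥ 0 then acc ++ [(PySem.List.pyGet? array (meio - i)).getD 0] else acc) novo0
    PySem.List.slice novo none (some indice_central)

-- ===== PORT B =====
-- _itl(xs, ys): take the head of xs, then continue with the roles swapped
def pvItl : List Int → List Int → List Int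
  | [], ys => ys
  | x :: xs, ys => x :: pvItl ys xs
termination_by xs ys => xs.length + ys.length
decreasing_by simp [List.length_cons]; omega

def extrair_elementos_centrais_alt (array : List Int) (indice_central : Int) : List Int :=
  let meio : Nat := array.length / 2
  let centro : Int := (PySem.List.pyGet? array (meio : Int)).getD 0
  let left : List Int := (array.take meio).reverse
  let right : List Int := array.drop (meio + 1)
  let pares : List Int :=
    if array.length % 2 == 0 then pvItl left right else pvItl right left
  PySem.List.slice (centro :: pares) none (some indice_central)

-- ===== PRECONDITION & SPEC =====
-- Pre_ excludes only the empty list, on which A raises IndexError (array[meio] with meio = 0).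
def Pre_extrair_elementos_centrais (array : List Int) (indice_central : Int) : Prop := array ≠ []
instance (array : List Int) (indice_central : Int) : Decidable (Pre_extrair_elementos_centrais array indice_central) := by unfold Pre_extrair_elementos_centrais; infer_instance
def pvWitness_extrair_elementos_centrais : List Int × Int := ([1, 2, 3, 4], 3)
def Spec_extrair_elementos_centrais (array : List Int) (indice_central : Int) (out : List Int) : Prop := out = extrair_elementos_centrais_alt array indice_central
instance (array : List Int) (indice_central : Int) (out : List Int) : Decidable (Spec_extrair_elementos_centrais array indice_central out) := by unfold Spec_extrair_elementos_centrais; infer_instance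

-- ===== CLAIM (what is proved, stated in full; the proofs are below) =====
def Claim_equal_extrair_elementos_centrais : Prop := ∀ (array : List Int) (indice_central : Int), Dom_extrair_elementos_centrais array indice_central → Pre_extrair_elementos_centrais array indice_central → Spec_extrair_elementos_centrais array indice_central (extrair_elementos_centrais array indice_central)

-- ===== LEMMAS AND PROOFS =====

lemma pvItl_nil_right (t : List Int) : pvItl t [] = t := by
  cases t <;> simp [pvItl]

lemma pvItl_map_range (k : Nat) (f g : Nat → Int) (t : List Int) :
    pvItl ((List.range k).map f ++ t) ((List.range k).map g)
      = (List.range k).flatMap (fun j => [f j, g j]) ++ pvItl t [] := by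
  induction k generalizing f g t with
  | zero => simp
  | succ k ih =>
      rw [List.range_succ_eq_map]
      simp only [List.map_cons, List.map_map, List.cons_append, List.flatMap_cons]
      rw [pvItl, pvItl]
      simp only [Function.comp_def, Nat.succ_eq_add_one]
      rw [ih (fun j => f (j + 1)) (fun j => g (j + 1)) t]
      simp [List.flatMap_map]

lemma pv_flatMap_congr {α β : Type} (l : List α) (f g : α → List β)
    (h : ∀ x ∈ l, f x = g x) : l.flatMap f = l.flatMap g := by
  induction l with
  | nil => rfl
  | cons a l ih =>
      simp only [List.flatMap_cons, h a (by simp), ih (fun x hx => h x (by simp [hx]))]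

lemma pv_list_eq_map_range (l : List Int) :
    l = (List.range l.length).map (fun j => l.getD j 0) := by
  apply List.ext_getElem
  · simp
  · intro i h1 h2
    simp [List.getD, List.getElem?_eq_getElem h1]

-- the guarded loop bodies rewritten to "append a block" form, then the two core identities
lemma pvG_natCast (array : List Int) (k : Nat) :
    (PySem.List.pyGet? array (k : Int)).getD 0 = array.getD k 0 := by
  simp [PySem.List.pyGet?_natCast, List.getD]

lemma pv_getD_reverse_take (array : List Int) (m j : Nat) (hm : m ≤ array.length) (hj : j < m) :
    ((array.take m).reverse).getD j 0 = array.getD (m - 1 - j) 0 := by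
  have h1 : ((array.take m).reverse).length = m := by simp; omega
  have hj' : j < ((array.take m).reverse).length := by omega
  rw [List.getD_eq_getElem _ _ hj', List.getElem_reverse, List.getElem_take,
      List.getD_eq_getElem _ _ (by omega)]
  congr 1
  simp at h1 ⊢
  omega

lemma pv_getD_drop (array : List Int) (i j : Nat) (h : i + j < array.length) :
    (array.drop i).getD j 0 = array.getD (i + j) 0 := by
  rw [List.getD_eq_getElem _ _ (by simp; omega), List.getElem_drop,
      List.getD_eq_getElem _ _ h]

lemma pv_even_core (array : List Int) (m : Nat) (hm : array.length = 2 * (m + 1)) :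
    (PySem.List.pyRange 1 (((m + 1 : Nat) : Int) + 1) 1).foldl
      (fun acc i =>
        let acc := if ((m + 1 : Nat) : Int) - i ≥ 0 then acc ++ [(PySem.List.pyGet? array (((m + 1 : Nat) : Int) - i)).getD 0] else acc
        if ((m + 1 : Nat) : Int) + i < (array.length : Int) then acc ++ [(PySem.List.pyGet? array (((m + 1 : Nat) : Int) + i)).getD 0] else acc)
      [(PySem.List.pyGet? array ((m + 1 : Nat) : Int)).getD 0]
    = (PySem.List.pyGet? array ((m + 1 : Nat) : Int)).getD 0 ::
        pvItl ((array.take (m + 1)).reverse) (array.drop (m + 1 + 1)) := by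
  have hbody : (fun (acc : List Int) (i : Int) =>
      let acc := if ((m + 1 : Nat) : Int) - i ≥ 0 then acc ++ [(PySem.List.pyGet? array (((m + 1 : Nat) : Int) - i)).getD 0] else acc
      if ((m + 1 : Nat) : Int) + i < (array.length : Int) then acc ++ [(PySem.List.pyGet? array (((m + 1 : Nat) : Int) + i)).getD 0] else acc)
      = fun (acc : List Int) (i : Int) => acc ++
        ((if ((m + 1 : Nat) : Int) - i ≥ 0 then [(PySem.List.pyGet? array (((m + 1 : Nat) : Int) - i)).getD 0] else []) ++
         (if ((m + 1 : Nat) : Int) + i < (array.length : Int) then [(PySem.List.pyGet? array (((m + 1 : Nat) : Int) + i)).getD 0] else [])) := by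
    funext acc i; dsimp only; split_ifs <;> simp
  rw [hbody, PySem.List.foldl_append_eq_flatMap, PySem.List.pyRange_one]
  have ht : (((m + 1 : Nat) : Int) + 1 - 1).toNat = m + 1 := by omega
  rw [ht, List.flatMap_map]
  have hLlen : ((array.take (m + 1)).reverse).length = m + 1 := by simp [hm]
  have hRlen : (array.drop (m + 1 + 1)).length = m := by simp [hm]; omega
  have key := pvItl_map_range m (fun j => ((array.take (m + 1)).reverse).getD j 0)
      (fun j => (array.drop (m + 1 + 1)).getD j 0) [((array.take (m + 1)).reverse).getD m 0]
  rw [pvItl_nil_right] at key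
  calc [(PySem.List.pyGet? array ((m + 1 : Nat) : Int)).getD 0] ++
        (List.range (m + 1)).flatMap ((fun i =>
          (if ((m + 1 : Nat) : Int) - i ≥ 0 then [(PySem.List.pyGet? array (((m + 1 : Nat) : Int) - i)).getD 0] else []) ++
          (if ((m + 1 : Nat) : Int) + i < (array.length : Int) then [(PySem.List.pyGet? array (((m + 1 : Nat) : Int) + i)).getD 0] else [])) ∘ (fun k : Nat => 1 + (k : Int)))
      = [(PySem.List.pyGet? array ((m + 1 : Nat) : Int)).getD 0] ++
        ((List.range m).flatMap (fun j => [((array.take (m + 1)).reverse).getD j 0, (array.drop (m + 1 + 1)).getD j 0])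
          ++ [((array.take (m + 1)).reverse).getD m 0]) := by
        rw [List.range_succ, List.flatMap_append]
        congr 1
        congr 1
        · apply pv_flatMap_congr
          intro x hx
          have hxm : x < m := List.mem_range.mp hx
          simp only [Function.comp]
          rw [if_pos (by omega), if_pos (by push_cast [hm]; omega)]
          have e1 : ((m + 1 : Nat) : Int) - (1 + (x : Int)) = ((m - x : Nat) : Int) := by omega
          have e2 : ((m + 1 : Nat) : Int) + (1 + (x : Int)) = ((m + 1 + 1 + x : Nat) : Int) := by push_cast; ring
          rw [e1, e2, pvG_natCast, pvG_natCast,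
              pv_getD_drop array (m + 1 + 1) x (by omega),
              pv_getD_reverse_take array (m + 1) x (by omega) (by omega)]
          have e3 : m + 1 - 1 - x = m - x := by omega
          rw [e3]
          simp
        · simp only [List.flatMap_cons, List.flatMap_nil, Function.comp]
          rw [if_pos (by omega), if_neg (by push_cast [hm]; omega)]
          have e4 : ((m + 1 : Nat) : Int) - (1 + (m : Int)) = ((0 : Nat) : Int) := by omega
          rw [e4, pvG_natCast,
              pv_getD_reverse_take array (m + 1) m (by omega) (by omega)]
          simp
    _ = (PySem.List.pyGet? array ((m + 1 : Nat) : Int)).getD 0 ::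
        pvItl ((array.take (m + 1)).reverse) (array.drop (m + 1 + 1)) := by
        rw [← key]
        conv_rhs => rw [pv_list_eq_map_range ((array.take (m + 1)).reverse),
                        pv_list_eq_map_range (array.drop (m + 1 + 1))]
        rw [hLlen, hRlen, List.range_succ, List.map_append]
        simp

lemma pv_odd_core (array : List Int) (m : Nat) (hm : array.length = 2 * m + 1) :
    (PySem.List.pyRange 1 (((m : Nat) : Int) + 1) 1).foldl
      (fun acc i =>
        let acc := if ((m : Nat) : Int) + i < (array.length : Int) then acc ++ [(PySem.List.pyGet? array (((m : Nat) : Int) + i)).getD 0] else acc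
        if ((m : Nat) : Int) - i ≥ 0 then acc ++ [(PySem.List.pyGet? array (((m : Nat) : Int) - i)).getD 0] else acc)
      [(PySem.List.pyGet? array ((m : Nat) : Int)).getD 0]
    = (PySem.List.pyGet? array ((m : Nat) : Int)).getD 0 ::
        pvItl (array.drop (m + 1)) ((array.take m).reverse) := by
  have hbody : (fun (acc : List Int) (i : Int) =>
      let acc := if ((m : Nat) : Int) + i < (array.length : Int) then acc ++ [(PySem.List.pyGet? array (((m : Nat) : Int) + i)).getD 0] else acc
      if ((m : Nat) : Int) - i ≥ 0 then acc ++ [(PySem.List.pyGet? array (((m : Nat) : Int) - i)).getD 0] else acc)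
      = fun (acc : List Int) (i : Int) => acc ++
        ((if ((m : Nat) : Int) + i < (array.length : Int) then [(PySem.List.pyGet? array (((m : Nat) : Int) + i)).getD 0] else []) ++
         (if ((m : Nat) : Int) - i ≥ 0 then [(PySem.List.pyGet? array (((m : Nat) : Int) - i)).getD 0] else [])) := by
    funext acc i; dsimp only; split_ifs <;> simp
  rw [hbody, PySem.List.foldl_append_eq_flatMap, PySem.List.pyRange_one]
  have ht : (((m : Nat) : Int) + 1 - 1).toNat = m := by omega
  rw [ht, List.flatMap_map]
  have hRlen : (array.drop (m + 1)).length = m := by simp [hm]; omega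
  have hLlen : ((array.take m).reverse).length = m := by simp [hm]; omega
  have key := pvItl_map_range m (fun j => (array.drop (m + 1)).getD j 0)
      (fun j => ((array.take m).reverse).getD j 0) []
  simp only [pvItl_nil_right, List.append_nil] at key
  calc [(PySem.List.pyGet? array ((m : Nat) : Int)).getD 0] ++
        (List.range m).flatMap ((fun i =>
          (if ((m : Nat) : Int) + i < (array.length : Int) then [(PySem.List.pyGet? array (((m : Nat) : Int) + i)).getD 0] else []) ++
          (if ((m : Nat) : Int) - i ≥ 0 then [(PySem.List.pyGet? array (((m : Nat) : Int) - i)).getD 0] else [])) ∘ (fun k : Nat => 1 + (k : Int)))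
      = [(PySem.List.pyGet? array ((m : Nat) : Int)).getD 0] ++
        (List.range m).flatMap (fun j => [(array.drop (m + 1)).getD j 0, ((array.take m).reverse).getD j 0]) := by
        congr 1
        apply pv_flatMap_congr
        intro x hx
        have hxm : x < m := List.mem_range.mp hx
        simp only [Function.comp]
        rw [if_pos (by push_cast [hm]; omega), if_pos (by omega)]
        have e1 : ((m : Nat) : Int) + (1 + (x : Int)) = ((m + 1 + x : Nat) : Int) := by push_cast; ring
        have e2 : ((m : Nat) : Int) - (1 + (x : Int)) = ((m - 1 - x : Nat) : Int) := by omega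
        rw [e1, e2, pvG_natCast, pvG_natCast,
            pv_getD_drop array (m + 1) x (by omega),
            pv_getD_reverse_take array m x (by omega) hxm]
        simp
    _ = (PySem.List.pyGet? array ((m : Nat) : Int)).getD 0 ::
        pvItl (array.drop (m + 1)) ((array.take m).reverse) := by
        rw [← key]
        conv_rhs => rw [pv_list_eq_map_range (array.drop (m + 1)),
                        pv_list_eq_map_range ((array.take m).reverse)]
        rw [hRlen, hLlen]
        simp

theorem extrair_elementos_centrais_core (array : List Int) (ic : Int)
    (hne : array ≠ []) :
    extrair_elementos_centrais array ic = extrair_elementos_centrais_alt array ic := by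
  have hn1 : 1 ≤ array.length := List.length_pos_iff.mpr hne
  have hmod : PySem.Int.mod (array.length : Int) 2 = ((array.length % 2 : Nat) : Int) := by
    rw [PySem.Int.mod_eq_emod_of_pos (by norm_num)]; omega
  have hdiv : PySem.Int.floordiv (array.length : Int) 2 = ((array.length / 2 : Nat) : Int) := by
    rw [PySem.Int.floordiv_eq_ediv_of_pos (by norm_num)]; omega
  unfold extrair_elementos_centrais extrair_elementos_centrais_alt
  simp only [hmod, hdiv]
  rcases Nat.mod_two_eq_zero_or_one array.length with hpar | hpar
  · -- even length, so array.length / 2 ≥ 1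
    obtain ⟨m, hm2⟩ : ∃ m, array.length / 2 = m + 1 := ⟨array.length / 2 - 1, by omega⟩
    have hm : array.length = 2 * (m + 1) := by omega
    simp only [hpar, hm2, Nat.cast_zero]
    rw [if_pos (by decide), if_pos (by decide)]
    rw [pv_even_core array m hm]
  · have hm : array.length = 2 * (array.length / 2) + 1 := by omega
    simp only [hpar]
    rw [if_neg (by decide), if_neg (by decide)]
    rw [pv_odd_core array (array.length / 2) hm]

-- ===== VERDICT (by name: the statement is the Claim_ definition above) =====
theorem extrair_elementos_centrais_spec : Claim_equal_extrair_elementos_centrais := by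
  intro array ic _ hpre
  unfold Spec_extrair_elementos_centrais
  exact extrair_elementos_centrais_core array ic hpre
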